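-- pv_equiv track=rewrite | github.com/Faraz126/Artifical-Intelligence-Assignments | Assignment1/Ass1-Code/Ass1-Code/Question1/JumpingFrogState.py | getCostOfActions
-- ===== SOURCE A (Python) =====
-- def getCostOfActions(actions):
--     """
--      actions: A list of actions to take
--
--     This method returns the total cost of a particular sequence of actions.  The sequence must
--     be composed of legal moves
--     """
--     cost = 0
--     for i in actions:
--         if i == 'left' or i == 'right':
--             cost += 1
--         else:
--             cost += 2
--     return cost
-- ===== SOURCE B (Python) =====
-- def getCostOfActions(actions):
--     freq = {}
--     for a in actions:
--         freq[a] = freq.get(a, 0) + 1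
--     cost = 0
--     for action, n in freq.items():
--         cost += n * (1 if action == 'left' or action == 'right' else 2)
--     return cost
-- ===== Notes on version B (the rewrite author's own statement) =====
-- stated objective: alternative
-- what changed: Instead of a branching running-cost accumulator over every action, B aggregates the actions into a frequency dictionary and then sums count * unit-cost over the distinct action types.
import Mathlib
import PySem

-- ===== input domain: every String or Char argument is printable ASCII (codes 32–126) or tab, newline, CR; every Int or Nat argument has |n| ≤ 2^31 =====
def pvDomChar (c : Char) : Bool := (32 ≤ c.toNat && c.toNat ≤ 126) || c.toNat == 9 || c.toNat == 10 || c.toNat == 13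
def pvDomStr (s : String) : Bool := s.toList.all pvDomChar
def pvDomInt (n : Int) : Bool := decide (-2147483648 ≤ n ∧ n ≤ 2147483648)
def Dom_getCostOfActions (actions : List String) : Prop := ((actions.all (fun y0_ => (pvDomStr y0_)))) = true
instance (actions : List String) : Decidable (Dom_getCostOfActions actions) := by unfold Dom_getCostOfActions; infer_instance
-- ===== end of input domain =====

-- B replaces the per-action branching accumulator by a frequency dictionary summed over distinct action types (alternative decomposition).
-- ===== PORT A =====
def getCostOfActions (actions : List String) : Int :=
  actions.foldl (fun cost i => if i == "left" || i == "right" then cost + 1 else cost + 2) 0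

-- ===== PORT B =====
def getCostOfActions_alt (actions : List String) : Int :=
  let freq : PySem.Dict String Int :=
    actions.foldl (fun d a => d.insert a (d.getD a 0 + 1)) PySem.Dict.empty
  freq.items.foldl
    (fun cost p => cost + p.2 * (if p.1 == "left" || p.1 == "right" then 1 else 2)) 0

-- ===== PRECONDITION & SPEC =====
def Spec_getCostOfActions (actions : List String) (out : Int) : Prop := out = getCostOfActions_alt actions
instance (actions : List String) (out : Int) : Decidable (Spec_getCostOfActions actions out) := by unfold Spec_getCostOfActions; infer_instance

-- ===== CLAIM (what is proved, stated in full; the proofs are below) =====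
def Claim_equal_getCostOfActions : Prop := ∀ (actions : List String), Dom_getCostOfActions actions → Spec_getCostOfActions actions (getCostOfActions actions)

-- ===== LEMMAS AND PROOFS =====
-- the per-action unit cost
def pvW (a : String) : Int := if a == "left" || a == "right" then 1 else 2

theorem foldl_add_map {α : Type} (f : α → Int) (l : List α) (c : Int) :
    l.foldl (fun acc x => acc + f x) c = c + (l.map f).sum := by
  induction l generalizing c with
  | nil => simp
  | cons hd tl ih => simp [ih]; ring

theorem sum_count_mul (l : List String) :
    ((PySem.Set.ofList l).map (fun k => (l.count k : Int) * pvW k)).sum = (l.map pvW).sum := by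
  have hnd : (PySem.Set.ofList l).Nodup := PySem.Set.nodup_ofList l
  have hfin : (PySem.Set.ofList l).toFinset = l.toFinset := by
    ext x; simp [PySem.Set.mem_ofList]
  rw [← List.sum_toFinset _ hnd, hfin, Finset.sum_list_map_count]
  simp

-- ===== VERDICT (by name: the statement is the Claim_ definition above) =====
theorem getCostOfActions_spec : Claim_equal_getCostOfActions := by
  intro actions _
  unfold Spec_getCostOfActions getCostOfActions getCostOfActions_alt
  rw [PySem.Dict.foldl_insert_getD_add_one_eq_counter]
  simp only [PySem.Dict.items_counter]
  have hA : (fun (cost : Int) i => if i == "left" || i == "right" then cost + 1 else cost + 2)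
      = (fun (cost : Int) i => cost + pvW i) := by
    funext c i
    unfold pvW
    by_cases h : (i == "left" || i == "right") = true <;> simp [h]
  rw [hA, foldl_add_map pvW,
      foldl_add_map (fun p : String × Int => p.2 * (if p.1 == "left" || p.1 == "right" then 1 else 2))]
  rw [List.map_map]
  have h := sum_count_mul actions
  have hfun : ((fun p : String × Int => p.2 * (if p.1 == "left" || p.1 == "right" then 1 else 2)) ∘
      fun k => (k, (actions.count k : Int)))
      = (fun k => (actions.count k : Int) * pvW k) := by
    funext k; simp [Function.comp, pvW]
  rw [hfun, h]
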